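-- pv_equiv track=rewrite | github.com/credizian/data_dictionary_builder | app.py | determine_required_keys
-- ===== SOURCE A (Python) =====
-- def determine_required_keys(items, timestamp_key="dateUpdated", percentage=90):
--     """Determine which keys are required based on their appearance in the most recent items."""
--
--     # Sort items by timestamp, newest first
--     sorted_items = sorted(items, key=lambda x: x.get(timestamp_key, ""), reverse=True)
--
--     # Determine the number of recent items to consider
--     num_recent_items = len(sorted_items) * percentage // 100
--
--     # Take the subset of the most recent items
--     recent_items = sorted_items[:num_recent_items]
--
--     key_counts = {}  # Dictionary to store the count of each key's appearance
--
--     # Count the appearance of each key in the recent items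
--     for item in recent_items:
--         for key in item.keys():
--             key_counts[key] = key_counts.get(key, 0) + 1
--
--     # Determine required keys (keys that appear in every recent item)
--     required_keys = {
--         key for key, count in key_counts.items() if count == num_recent_items
--     }
--
--     return required_keys
-- ===== SOURCE B (Python) =====
-- def determine_required_keys(items, timestamp_key="dateUpdated", percentage=90):
--     """Determine which keys are required based on their appearance in the most recent items."""
--     num_recent_items = len(items) * percentage // 100
--     # no key can appear in exactly num_recent_items recent items when that
--     # count is non-positive or larger than the number of items available
--     if num_recent_items <= 0 or num_recent_items > len(items):
--         return set()
--     recent_items = sorted(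
--         items, key=lambda x: x.get(timestamp_key, ""), reverse=True
--     )[:num_recent_items]
--     required = set(recent_items[0].keys())
--     for item in recent_items[1:]:
--         required &= item.keys()
--     return required
-- ===== Notes on version B (the rewrite author's own statement) =====
-- stated objective: simpler
-- what changed: B keeps the sort-and-slice but replaces A's per-key appearance-count dictionary compared against the threshold by a shrinking common-key set: start from the first recent item's keys and intersect with each remaining item's keys (empty when the recent-item count is non-positive or exceeds the number of items, where no key can appear that many times).
import Mathlib
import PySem

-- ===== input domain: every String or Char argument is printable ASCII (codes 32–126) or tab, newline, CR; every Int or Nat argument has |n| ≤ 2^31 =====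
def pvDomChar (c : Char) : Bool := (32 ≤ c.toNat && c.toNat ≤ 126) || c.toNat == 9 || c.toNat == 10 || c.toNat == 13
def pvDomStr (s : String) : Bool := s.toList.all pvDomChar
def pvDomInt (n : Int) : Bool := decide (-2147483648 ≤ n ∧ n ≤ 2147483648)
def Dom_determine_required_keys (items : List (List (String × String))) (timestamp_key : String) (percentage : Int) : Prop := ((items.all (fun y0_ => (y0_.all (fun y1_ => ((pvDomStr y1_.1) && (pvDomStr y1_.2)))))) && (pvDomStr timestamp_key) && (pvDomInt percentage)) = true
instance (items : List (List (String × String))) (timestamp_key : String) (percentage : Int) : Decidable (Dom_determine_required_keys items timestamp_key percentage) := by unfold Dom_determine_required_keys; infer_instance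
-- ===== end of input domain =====

-- B replaces A's per-key count dict compared against a threshold by a shrinking
-- set intersection over the recent items (objective: simpler).


-- ===== PORT A =====
-- x.get(timestamp_key, "") on the dict x (association list, first match)
def pvGetTs (x : List (String × String)) (timestamp_key : String) : String :=
  ((x.find? (fun kv => kv.1 == timestamp_key)).map Prod.snd).getD ""

-- item.keys(): the distinct keys in insertion (first-occurrence) order
def pvKeys (x : List (String × String)) : List String :=
  PySem.List.dedup (x.map Prod.fst)

def determine_required_keys (items : List (List (String × String))) (timestamp_key : String) (percentage : Int) : List String :=
  let sorted_items := PySem.List.sorted items (fun x => pvGetTs x timestamp_key) true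
  let num_recent_items : Int := PySem.Int.floordiv (PySem.List.len sorted_items * percentage) 100
  let recent_items := PySem.List.slice sorted_items none (some num_recent_items)
  let key_counts : PySem.Dict String Int :=
    recent_items.foldl
      (fun d item => (pvKeys item).foldl (fun d k => d.insert k (d.getD k 0 + 1)) d)
      PySem.Dict.empty
  PySem.Set.ofList ((key_counts.items.filter (fun kc => kc.2 == num_recent_items)).map Prod.fst)

-- ===== PORT B =====
def determine_required_keys_alt (items : List (List (String × String))) (timestamp_key : String) (percentage : Int) : List String :=
  let num_recent_items : Int := PySem.Int.floordiv (PySem.List.len items * percentage) 100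
  if num_recent_items ≤ 0 ∨ PySem.List.len items < num_recent_items then []
  else
    let recent_items := PySem.List.slice (PySem.List.sorted items (fun x => pvGetTs x timestamp_key) true) none (some num_recent_items)
    match recent_items with
    | [] => []   -- unreachable (0 < num_recent_items ≤ len items): totalises recent_items[0]
    | h :: t =>
      t.foldl (fun required item => PySem.Set.inter required (pvKeys item))
        (PySem.Set.ofList (pvKeys h))

-- ===== PRECONDITION & SPEC =====
def Spec_determine_required_keys (items : List (List (String × String))) (timestamp_key : String) (percentage : Int) (out : List String) : Prop := out = determine_required_keys_alt items timestamp_key percentage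
instance (items : List (List (String × String))) (timestamp_key : String) (percentage : Int) (out : List String) : Decidable (Spec_determine_required_keys items timestamp_key percentage out) := by unfold Spec_determine_required_keys; infer_instance

-- ===== CLAIM (what is proved, stated in full; the proofs are below) =====
def Claim_equal_determine_required_keys : Prop := ∀ (items : List (List (String × String))) (timestamp_key : String) (percentage : Int), Dom_determine_required_keys items timestamp_key percentage → Spec_determine_required_keys items timestamp_key percentage (determine_required_keys items timestamp_key percentage)

-- ===== LEMMAS AND PROOFS =====

-- the nested counting loop over items is the flat counting loop over the concatenated key lists
theorem pv_foldl_flat (L : List (List (String × String))) (d : PySem.Dict String Int) :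
    L.foldl (fun d item => (pvKeys item).foldl (fun d k => d.insert k (d.getD k 0 + 1)) d) d
      = (L.flatMap pvKeys).foldl (fun d k => d.insert k (d.getD k 0 + 1)) d := by
  induction L generalizing d with
  | nil => rfl
  | cons h t ih => simp [List.flatMap_cons, List.foldl_append, ih]

-- counting occurrences in a flatMap of nodup lists counts the lists that contain the key
theorem pv_count_flatMap (L : List (List (String × String))) (k : String) :
    (L.flatMap pvKeys).count k = L.countP (fun it => k ∈ pvKeys it) := by
  induction L with
  | nil => rfl
  | cons h t ih =>
    rw [List.flatMap_cons, List.count_append, List.countP_cons, ih]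
    by_cases hk : k ∈ pvKeys h
    · rw [List.count_eq_one_of_mem (by exact PySem.List.nodup_dedup _) hk]
      simp [hk]; omega
    · rw [List.count_eq_zero_of_not_mem hk]; simp [hk]

-- Set.update appends only elements not already present
theorem pv_update_append (s : PySem.Set String) (ys : List String) :
    ∃ zs, PySem.Set.update s ys = s ++ zs ∧ ∀ z ∈ zs, z ∉ s := by
  induction ys generalizing s with
  | nil => exact ⟨[], by simp [PySem.Set.update], by simp⟩
  | cons y ys ih =>
    by_cases hy : y ∈ s
    · obtain ⟨zs, h1, h2⟩ := ih s
      exact ⟨zs, by simpa [PySem.Set.update, PySem.Set.add, PySem.Set.contains, hy] using h1, h2⟩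
    · obtain ⟨zs, h1, h2⟩ := ih (s ++ [y])
      refine ⟨y :: zs, ?_, ?_⟩
      · simpa [PySem.Set.update, PySem.Set.add, PySem.Set.contains, hy] using h1
      · intro z hz
        rcases List.mem_cons.mp hz with rfl | hz
        · exact hy
        · intro hzs; exact h2 z hz (by simp [hzs])

-- B's intersection loop is a single filter by membership in every item
theorem pv_foldl_inter (t : List (List (String × String))) (s : PySem.Set String) :
    t.foldl (fun required item => PySem.Set.inter required (pvKeys item)) s
      = s.filter (fun k => decide (∀ it ∈ t, k ∈ pvKeys it)) := by
  induction t generalizing s with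
  | nil => simp
  | cons h t ih =>
    rw [List.foldl_cons, ih, PySem.Set.inter, List.filter_filter]
    refine List.filter_congr ?_
    intro k _
    simp [PySem.Set.contains, Bool.and_comm]

theorem pv_main (items : List (List (String × String))) (timestamp_key : String) (percentage : Int) :
    determine_required_keys items timestamp_key percentage
      = determine_required_keys_alt items timestamp_key percentage := by
  unfold determine_required_keys determine_required_keys_alt
  simp only [PySem.List.len_eq, PySem.List.length_sorted]
  set L := PySem.List.sorted items (fun x => pvGetTs x timestamp_key) true with hL
  set n : Int := PySem.Int.floordiv ((items.length : Int) * percentage) 100 with hn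
  have hLlen : L.length = items.length := PySem.List.length_sorted _ _ _
  set recent := PySem.List.slice L none (some n) with hrec
  -- A's dict is the counter of the flattened key lists
  rw [pv_foldl_flat, PySem.Dict.foldl_insert_getD_add_one_eq_counter, PySem.Dict.items_counter]
  set ks := recent.flatMap pvKeys with hks
  rw [List.filter_map, List.map_map]
  have hmapfst : (Prod.fst ∘ fun k => (k, (ks.count k : Int))) = id := rfl
  rw [hmapfst, List.map_id]
  have hpred : ((fun kc : String × Int => kc.2 == n) ∘ fun k => (k, (List.count k ks : Int)))
      = fun k => ((List.count k ks : Int) == n) := rfl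
  rw [hpred]
  -- case split
  by_cases h0 : n ≤ 0 ∨ (items.length : Int) < n
  · -- A's filter is empty: counts of present keys are ≥ 1 and ≤ |recent| ≤ len < n
    rw [if_pos h0]
    have hempty : ((PySem.Set.ofList ks).filter
        (fun kc : String => ((ks.count kc : Int) == n))) = [] := by
      rw [List.filter_eq_nil_iff]
      intro k hk
      have hkmem : k ∈ ks := (PySem.Set.mem_ofList _ _).mp hk
      have hpos : 1 ≤ ks.count k := List.one_le_count_iff.mpr hkmem
      have hle : ks.count k ≤ recent.length := by
        rw [hks, pv_count_flatMap]; exact List.countP_le_length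
      rcases h0 with h0 | h0
      · simp only [beq_iff_eq]; intro hEq; omega
      · have hrl : recent.length ≤ items.length := by
          have h0' : (0:Int) ≤ n := le_of_lt (lt_of_le_of_lt (by positivity) h0)
          rw [hrec, PySem.List.slice_to _ h0']
          calc (L.take n.toNat).length ≤ L.length := by simp
            _ = items.length := hLlen
        simp only [beq_iff_eq]; intro hEq
        have : (ks.count k : Int) ≤ (items.length : Int) := by exact_mod_cast le_trans hle hrl
        omega
    rw [hempty]
    rfl
  · rw [if_neg h0]
    have h0pos : (0:Int) < n := lt_of_not_ge (fun hh => h0 (Or.inl hh))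
    have h0le : n ≤ (items.length : Int) := le_of_not_gt (fun hh => h0 (Or.inr hh))
    have hnn : (0:Int) ≤ n := le_of_lt h0pos
    have hrecval : recent = L.take n.toNat := by rw [hrec, PySem.List.slice_to _ hnn]
    have hreclen : recent.length = n.toNat := by
      rw [hrecval, List.length_take, hLlen]; omega
    have hne : recent ≠ [] := by
      intro hcon; rw [hcon] at hreclen; simp at hreclen; omega
    obtain ⟨h, t, hht⟩ := List.exists_cons_of_ne_nil hne
    rw [hht]
    show _ = t.foldl (fun required item => PySem.Set.inter required (pvKeys item))
        (PySem.Set.ofList (pvKeys h))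
    rw [pv_foldl_inter]
    -- rewrite A's count test into "k appears in every recent item"
    have hfc : ((PySem.Set.ofList ks).filter (fun k => ((ks.count k : Int) == n))) =
        ((PySem.Set.ofList ks).filter (fun k => decide (∀ it ∈ recent, k ∈ pvKeys it))) := by
      refine List.filter_congr ?_
      intro k hk
      have hle : ks.count k ≤ recent.length := by
        rw [hks, pv_count_flatMap]; exact List.countP_le_length
      have : (ks.count k : Int) = n ↔ ks.count k = recent.length := by
        rw [hreclen]; omega
      rw [Bool.eq_iff_iff]
      simp only [beq_iff_eq, decide_eq_true_eq]
      rw [this, hks, pv_count_flatMap]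
      constructor
      · intro hEq it hit
        have := List.countP_eq_length.mp hEq it hit
        simpa using this
      · intro hall
        exact List.countP_eq_length.mpr (fun it hit => by simpa using hall it hit)
    rw [hfc]
    -- split Set.ofList ks = pvKeys h ++ zs with zs disjoint from pvKeys h
    have hks' : ks = pvKeys h ++ t.flatMap pvKeys := by rw [hks, hht, List.flatMap_cons]
    have hofl : PySem.Set.ofList ks = PySem.Set.update (pvKeys h) (t.flatMap pvKeys) := by
      rw [hks', PySem.Set.ofList, List.foldl_append, PySem.Set.update]
      congr 1
      exact PySem.Set.ofList_eq_self_of_nodup _ (PySem.List.nodup_dedup _)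
    obtain ⟨zs, hzs, hdis⟩ := pv_update_append (pvKeys h) (t.flatMap pvKeys)
    rw [hofl, hzs, List.filter_append]
    have hz0 : zs.filter (fun k => decide (∀ it ∈ recent, k ∈ pvKeys it)) = [] := by
      rw [List.filter_eq_nil_iff]
      intro z hz hcon
      simp only [decide_eq_true_eq] at hcon
      exact hdis z hz (hcon h (by rw [hht]; exact List.mem_cons_self))
    rw [hz0, List.append_nil]
    rw [PySem.Set.ofList_eq_self_of_nodup ((pvKeys h).filter _)
          (List.Nodup.filter _ (PySem.List.nodup_dedup (h.map Prod.fst))),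
        PySem.Set.ofList_eq_self_of_nodup (pvKeys h) (PySem.List.nodup_dedup (h.map Prod.fst))]
    refine List.filter_congr ?_
    intro k hkmem
    rw [hht]
    simp [hkmem]

-- ===== VERDICT (by name: the statement is the Claim_ definition above) =====
theorem determine_required_keys_spec : Claim_equal_determine_required_keys := by
  intro items timestamp_key percentage _
  exact pv_main items timestamp_key percentage
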